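-- pv_equiv track=rewrite | github.com/marlcplhra/SSCard | src/sscard.py | calc_C
-- ===== SOURCE A (Python) =====
-- def calc_C(s):
--     """ calculate the first occurance of a letter in sorted string s """
--     A = {}
--     for i, (c, idx, pos) in enumerate(s):
--         if A.get(c):
--             A[c] += 1
--         else:
--             A[c] = 1
--
--     letters = sorted(A.keys())
--
--     C = {}
--
--     idx = 0
--     for c in letters:
--         C[c] = idx
--         idx += A[c]
--
--     return C, A
-- ===== SOURCE B (Python) =====
-- def calc_C(s):
--     """ calculate the first occurance of a letter in sorted string s """
--     chars = [c for (c, idx, pos) in s]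
--     ks = list(dict.fromkeys(chars))
--     A = {c: chars.count(c) for c in ks}
--     C = {c: sum(d < c for d in chars) for c in sorted(ks)}
--     return C, A
-- ===== Notes on version B (the rewrite author's own statement) =====
-- stated objective: alternative
-- what changed: Replaces the increment-counter pass and the running prefix-sum over sorted keys by direct per-key closed forms: A[c] = chars.count(c) over the first-occurrence dedup of the keys, and C[c] = number of characters strictly below c, so no accumulator is threaded at all.
import Mathlib
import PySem

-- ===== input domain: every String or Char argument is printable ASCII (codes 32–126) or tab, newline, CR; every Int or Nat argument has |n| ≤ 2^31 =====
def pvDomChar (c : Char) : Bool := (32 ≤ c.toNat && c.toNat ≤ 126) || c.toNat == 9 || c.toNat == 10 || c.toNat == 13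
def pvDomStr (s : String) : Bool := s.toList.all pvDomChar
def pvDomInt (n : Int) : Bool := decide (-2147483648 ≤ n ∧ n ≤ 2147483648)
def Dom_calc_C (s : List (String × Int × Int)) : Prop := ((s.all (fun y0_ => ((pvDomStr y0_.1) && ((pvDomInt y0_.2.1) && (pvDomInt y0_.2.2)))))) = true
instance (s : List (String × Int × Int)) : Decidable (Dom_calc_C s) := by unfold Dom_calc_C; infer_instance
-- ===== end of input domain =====

-- B replaces A's increment-counter pass and running prefix-sum by per-key closed forms
-- (count of the key, and count of strictly smaller characters); alternative decomposition, not faster.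

-- ===== PORT A =====
def calc_C (s : List (String × Int × Int)) : (List (String × Int)) × (List (String × Int)) :=
  -- for i, (c, idx, pos) in enumerate(s): if A.get(c): A[c] += 1 else: A[c] = 1
  -- 'if A.get(c)' is falsy exactly when the key is absent (None) or stored as 0,
  -- i.e. exactly when A.get(c, 0) == 0 — values here are ints, so getD _ 0 == 0 is exact.
  let A := (PySem.List.enumerate s).foldl
      (fun (d : PySem.Dict String Int) p =>
        let c := p.2.1
        let v := d.getD c 0
        if v == 0 then d.insert c 1 else d.insert c (v + 1))
      PySem.Dict.empty
  let letters := PySem.List.sorted A.keys (fun x => x)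
  let r := letters.foldl
      (fun (p : PySem.Dict String Int × Int) c =>
        (p.1.insert c p.2, p.2 + A.getD c 0))   -- A[c]: key always present (c ∈ A.keys), so getD is exact
      (PySem.Dict.empty, 0)
  (r.1.items, A.items)

-- ===== PORT B =====
def calc_C_alt (s : List (String × Int × Int)) : (List (String × Int)) × (List (String × Int)) :=
  let chars := s.map (fun t => t.1)
  let ks := PySem.List.dedup chars                      -- list(dict.fromkeys(chars))
  -- dict comprehensions over lists of distinct keys: their items are exactly these maps
  let A := ks.map (fun c => ((c, (PySem.List.count chars c : Int)) : String × Int))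
  let C := (PySem.List.sorted ks (fun x => x)).map
      (fun c => ((c, (chars.countP (fun d => decide (d < c)) : Int)) : String × Int))
  (C, A)

-- ===== PRECONDITION & SPEC =====
def Spec_calc_C (s : List (String × Int × Int)) (out : (List (String × Int)) × (List (String × Int))) : Prop := out = calc_C_alt s
instance (s : List (String × Int × Int)) (out : (List (String × Int)) × (List (String × Int))) : Decidable (Spec_calc_C s out) := by unfold Spec_calc_C; infer_instance

-- ===== CLAIM (what is proved, stated in full; the proofs are below) =====
def Claim_equal_calc_C : Prop := ∀ (s : List (String × Int × Int)), Dom_calc_C s → Spec_calc_C s (calc_C s)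

-- ===== LEMMAS AND PROOFS =====

-- A's counting step always stores getD + 1 (the 'absent/0' branch stores 1 = 0 + 1).
theorem pv_stepA_eq :
    (fun (d : PySem.Dict String Int) (p : Int × String × Int × Int) =>
      if d.getD p.2.1 0 == 0 then d.insert p.2.1 1 else d.insert p.2.1 (d.getD p.2.1 0 + 1))
    = fun (d : PySem.Dict String Int) p => d.insert p.2.1 (d.getD p.2.1 0 + 1) := by
  funext d p
  by_cases h : d.getD p.2.1 0 = 0 <;> simp [h]

-- A's counting fold over enumerate s uses only the String component: fold over s.map (·.1)
theorem pv_foldl_enumerate_fst :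
    ∀ (s : List (String × Int × Int)) (n : Int) (acc : PySem.Dict String Int),
      (PySem.List.enumerate s n).foldl (fun d p => d.insert p.2.1 (d.getD p.2.1 0 + 1)) acc
        = (s.map (fun t => t.1)).foldl (fun d c => d.insert c (d.getD c 0 + 1)) acc := by
  intro s
  induction s with
  | nil => intro n acc; simp [PySem.List.enumerate]
  | cons x xs ih => intro n acc; simp [PySem.List.enumerate_cons, ih]

-- splitting the 'not yet processed' count at a fresh key c
theorem pv_countP_split (c : String) (L' : List String) (hc : c ∉ L') (chars : List String) :
    chars.countP (fun d => !decide (d ∈ L'))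
      = chars.countP (fun d => !decide (d ∈ c :: L')) + chars.count c := by
  induction chars with
  | nil => simp
  | cons a as ih =>
    simp only [List.countP_cons, List.count_cons, ih]
    by_cases h : a = c
    · subst h; simp [hc]; omega
    · by_cases h2 : a ∈ L' <;> simp [h, h2]
      omega

-- the C-building loop of A: on a strictly sorted list L covering every character,
-- it produces, key by key, the count of strictly smaller characters.
theorem pv_loopC (chars : List String) :
    ∀ (L : List String) (acc : PySem.Dict String Int) (idx : Int),
      L.Pairwise (· < ·) →
      (∀ d ∈ chars, d ∈ L ∨ ∀ c ∈ L, d < c) →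
      (∀ c ∈ L, acc.contains c = false) →
      idx = (chars.countP (fun d => !decide (d ∈ L)) : Int) →
      ((L.foldl
          (fun (p : PySem.Dict String Int × Int) c =>
            (p.1.insert c p.2, p.2 + (PySem.Dict.counter chars).getD c 0))
          (acc, idx)).1).items
        = acc.items ++ L.map (fun c => ((c, (chars.countP (fun d => decide (d < c)) : Int)) : String × Int)) := by
  intro L
  induction L with
  | nil => intro acc idx _ _ _ _; simp
  | cons c L' ih =>
    intro acc idx hp hin hacc hidx
    have hpc : ∀ e ∈ L', c < e := fun e he => (List.pairwise_cons.1 hp).1 e he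
    have hcL' : c ∉ L' := fun h => lt_irrefl c (hpc c h)
    -- the stored value idx is exactly the number of characters < c
    have hidx' : idx = (chars.countP (fun d => decide (d < c)) : Int) := by
      rw [hidx]; congr 1
      apply List.countP_congr
      intro d hd
      simp only [Bool.not_eq_true', decide_eq_false_iff_not, decide_eq_true_eq]
      constructor
      · intro hnot
        rcases hin d hd with h | h
        · exact absurd h hnot
        · exact h c (by simp)
      · intro hlt
        rw [List.mem_cons]
        push Not
        exact ⟨ne_of_lt hlt, fun hmem => absurd hlt (lt_asymm (hpc d hmem))⟩
    simp only [List.foldl_cons]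
    rw [ih (acc.insert c idx) (idx + (PySem.Dict.counter chars).getD c 0)
      (List.pairwise_cons.1 hp).2
      (by
        intro d hd
        rcases hin d hd with h | h
        · rcases List.mem_cons.1 h with rfl | h'
          · exact Or.inr (fun e he => hpc e he)
          · exact Or.inl h'
        · exact Or.inr (fun e he => h e (by simp [he])))
      (by
        intro e he
        rw [PySem.Dict.contains_insert]
        have : (e == c) = false := by simp [ne_of_gt (hpc e he)]
        simp [this, hacc e (by simp [he])])
      (by
        rw [PySem.Dict.getD_counter, hidx,
            pv_countP_split c L' hcL' chars]
        push_cast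
        ring)]
    rw [PySem.Dict.items_insert_of_not_contains _ idx (hacc c (by simp))]
    simp [hidx']

theorem pv_items_empty : (PySem.Dict.empty : PySem.Dict String Int).items = [] := rfl

theorem calc_C_eq_alt (s : List (String × Int × Int)) : calc_C s = calc_C_alt s := by
  simp only [calc_C, calc_C_alt]
  rw [pv_stepA_eq]
  rw [pv_foldl_enumerate_fst s 0 PySem.Dict.empty]
  rw [PySem.Dict.foldl_insert_getD_add_one_eq_counter]
  set chars := s.map (fun t => t.1) with hchars
  rw [PySem.Dict.keys_counter]
  rw [pv_loopC chars (PySem.List.sorted (PySem.Set.ofList chars) (fun x => x))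
      PySem.Dict.empty 0
      (PySem.List.sorted_ofList_pairwise_lt chars)
      (by
        intro d hd
        exact Or.inl (by rw [PySem.List.mem_sorted]; exact (PySem.Set.mem_ofList chars d).2 hd))
      (by intro c _; simp [PySem.Dict.contains_empty])
      (by
        have h0 : chars.countP (fun d => !decide (d ∈ PySem.List.sorted (PySem.Set.ofList chars) (fun x => x))) = 0 := by
          rw [List.countP_eq_zero]
          intro d hd
          simp [PySem.List.mem_sorted, (PySem.Set.mem_ofList chars d).2 hd]
        exact_mod_cast h0.symm)]
  simp [pv_items_empty, PySem.Dict.items_counter, PySem.List.count_eq]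

-- ===== VERDICT (by name: the statement is the Claim_ definition above) =====
theorem calc_C_spec : Claim_equal_calc_C := by
  intro s _
  exact calc_C_eq_alt s
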